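-- pv_equiv track=rewrite | github.com/oryx19/Candy_Crush | candycrush_ui.py | detecter_alignement_verti
-- ===== SOURCE A (Python) =====
-- def detecter_alignement_verti(g):
--     # BUG FIX #1 : les deux blocs `if` étaient à l'intérieur du while interne
--     # → ils doivent être au même niveau que le while interne (après sa fermeture)
--     alignements = []
--     nb_lignes = len(g)
--     nb_colonnes = len(g[0])
--     for j in range(nb_colonnes):
--         k = 0
--         while k < nb_lignes:
--             debut = k
--             couleur = g[k][j]
--             while k < nb_lignes and g[k][j] == couleur and couleur != -1:
--                 k += 1
--             # ← ngoài vòng while con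
--             if k - debut >= 3:
--                 for i in range(debut, k):
--                     alignements.append([i, j])
--             if k == debut:
--                 k += 1
--     return alignements
-- ===== SOURCE B (Python) =====
-- def detecter_alignement_verti(g):
--     # Per-cell sliding-window test: cell (i,j) belongs to a vertical run of >= 3
--     # iff some window of 3 consecutive equal cells (color != -1) contains it.
--     nb_lignes = len(g)
--     nb_colonnes = len(g[0])
--     alignements = []
--     for j in range(nb_colonnes):
--         for i in range(nb_lignes):
--             c = g[i][j]
--             if c != -1 and any(
--                 0 <= s and s + 2 < nb_lignes
--                 and g[s][j] == c and g[s + 1][j] == c and g[s + 2][j] == c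
--                 for s in (i - 2, i - 1, i)
--             ):
--                 alignements.append([i, j])
--     return alignements
-- ===== Notes on version B (the rewrite author's own statement) =====
-- stated objective: alternative
-- what changed: Replaces A's stateful nested while-loops that scan maximal runs and then re-emit them with a per-cell sliding-window membership test (a cell is output iff one of the 3-windows containing it is monochromatic and not -1), removing all run/start bookkeeping.
import Mathlib
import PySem

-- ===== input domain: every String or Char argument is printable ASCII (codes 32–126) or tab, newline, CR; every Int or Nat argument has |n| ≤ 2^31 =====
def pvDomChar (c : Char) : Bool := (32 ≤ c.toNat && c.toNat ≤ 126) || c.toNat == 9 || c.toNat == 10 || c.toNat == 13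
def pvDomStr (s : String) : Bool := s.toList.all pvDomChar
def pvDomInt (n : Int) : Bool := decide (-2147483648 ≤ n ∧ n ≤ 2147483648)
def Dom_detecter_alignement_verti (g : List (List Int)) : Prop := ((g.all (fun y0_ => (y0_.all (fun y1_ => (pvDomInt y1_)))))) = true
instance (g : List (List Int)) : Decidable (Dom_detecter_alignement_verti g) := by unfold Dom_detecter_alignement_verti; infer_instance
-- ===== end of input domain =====

-- B replaces A's nested while-loop run scanning by a per-cell 3-window membership test (alternative algorithm, same cost).

-- ===== PORT A =====
-- g[i][j] for the nonnegative in-range indices both programs use under Pre_ (exact there; default 0 outside)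
def pvCell (g : List (List Int)) (i j : Nat) : Int :=
  ((g[i]?.getD ([] : List Int))[j]?).getD 0

-- inner while: `while k < nb_lignes and g[k][j] == couleur and couleur != -1: k += 1`
def pvScanA (g : List (List Int)) (j n : Nat) (couleur : Int) (k : Nat) : Nat :=
  if _h : k < n then
    if pvCell g k j = couleur ∧ couleur ≠ -1 then pvScanA g j n couleur (k + 1) else k
  else k
termination_by n - k

-- needed by pvOuterA's termination argument
theorem pvScanA_ge (g : List (List Int)) (j n : Nat) (couleur : Int) (k : Nat) :
    k ≤ pvScanA g j n couleur k := by
  unfold pvScanA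
  split
  · split
    · have := pvScanA_ge g j n couleur (k + 1); omega
    · omega
  · omega
termination_by n - k

-- outer while over k, one iteration per maximal segment
def pvOuterA (g : List (List Int)) (j n : Nat) (k : Nat) (acc : List (List Int)) : List (List Int) :=
  if _h : k < n then
    let debut := k
    let couleur := pvCell g k j
    let k' := pvScanA g j n couleur k
    let acc' := if 3 ≤ k' - debut then
        acc ++ (List.range' debut (k' - debut)).map (fun i : Nat => [(i : Int), (j : Int)])
      else acc
    let k'' := if k' = debut then debut + 1 else k'
    pvOuterA g j n k'' acc'
  else acc
termination_by n - k
decreasing_by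
  have := pvScanA_ge g j n (pvCell g k j) k
  split <;> omega

def detecter_alignement_verti (g : List (List Int)) : List (List Int) :=
  let n := g.length
  let m := (g[0]?.getD ([] : List Int)).length
  (List.range m).foldl (fun acc j => pvOuterA g j n 0 acc) []

-- ===== PORT B =====
-- the window test `0 <= s and s + 2 < n and g[s][j] == c and g[s+1][j] == c and g[s+2][j] == c`
def pvWinB (g : List (List Int)) (n j : Nat) (c : Int) (s : Int) : Bool :=
  decide (0 ≤ s) && decide (s + 2 < (n : Int)) &&
    (pvCell g s.toNat j == c) && (pvCell g (s.toNat + 1) j == c) && (pvCell g (s.toNat + 2) j == c)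

-- `c != -1 and any(... for s in (i-2, i-1, i))`
def pvTestB (g : List (List Int)) (n j i : Nat) : Bool :=
  (pvCell g i j != -1) && ([(i : Int) - 2, (i : Int) - 1, (i : Int)].any (pvWinB g n j (pvCell g i j)))

-- inner `for i in range(nb_lignes)` of B
def pvColB (g : List (List Int)) (n j : Nat) : List (List Int) :=
  (List.range n).foldl
    (fun acc i => if pvTestB g n j i then acc ++ [[(i : Int), (j : Int)]] else acc) []

def detecter_alignement_verti_alt (g : List (List Int)) : List (List Int) :=
  let n := g.length
  let m := (g[0]?.getD ([] : List Int)).length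
  (List.range m).foldl (fun acc j => acc ++ pvColB g n j) []

-- ===== PRECONDITION & SPEC =====
-- Pre_ excludes exactly the inputs where Python A raises: the empty grid (g[0] → IndexError)
-- and ragged grids with a row shorter than the first row (g[k][j] → IndexError).
def Pre_detecter_alignement_verti (g : List (List Int)) : Prop :=
  g ≠ [] ∧ ∀ row ∈ g, (g[0]?.getD ([] : List Int)).length ≤ row.length
instance (g : List (List Int)) : Decidable (Pre_detecter_alignement_verti g) := by
  unfold Pre_detecter_alignement_verti; infer_instance

def pvWitness_detecter_alignement_verti : List (List Int) := [[1, 5], [1, -1], [1, 2]]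

def Spec_detecter_alignement_verti (g : List (List Int)) (out : List (List Int)) : Prop := out = detecter_alignement_verti_alt g
instance (g : List (List Int)) (out : List (List Int)) : Decidable (Spec_detecter_alignement_verti g out) := by unfold Spec_detecter_alignement_verti; infer_instance

-- ===== CLAIM (what is proved, stated in full; the proofs are below) =====
def Claim_equal_detecter_alignement_verti : Prop := ∀ (g : List (List Int)), Dom_detecter_alignement_verti g → Pre_detecter_alignement_verti g → Spec_detecter_alignement_verti g (detecter_alignement_verti g)

-- ===== LEMMAS AND PROOFS =====

theorem pvScanA_le (g : List (List Int)) (j n : Nat) (couleur : Int) (k : Nat)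
    (hk : k ≤ n) : pvScanA g j n couleur k ≤ n := by
  unfold pvScanA
  split
  · split
    · exact pvScanA_le g j n couleur (k + 1) (by omega)
    · omega
  · omega
termination_by n - k

theorem pvScanA_run (g : List (List Int)) (j n : Nat) (couleur : Int) (k : Nat) :
    ∀ t, k ≤ t → t < pvScanA g j n couleur k → pvCell g t j = couleur ∧ couleur ≠ -1 := by
  intro t ht htlt
  unfold pvScanA at htlt
  split at htlt
  · split at htlt
    · rcases Nat.eq_or_lt_of_le ht with h | h
      · subst h; assumption
      · exact pvScanA_run g j n couleur (k + 1) t h htlt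
    · omega
  · omega
termination_by n - k

theorem pvScanA_stop (g : List (List Int)) (j n : Nat) (couleur : Int) (k : Nat)
    (h : pvScanA g j n couleur k < n) :
    ¬(pvCell g (pvScanA g j n couleur k) j = couleur ∧ couleur ≠ -1) := by
  by_cases hn : k < n
  · by_cases hc : pvCell g k j = couleur ∧ couleur ≠ -1
    · rw [pvScanA, dif_pos hn, if_pos hc] at h ⊢
      exact pvScanA_stop g j n couleur (k + 1) h
    · rw [pvScanA, dif_pos hn, if_neg hc] at h ⊢
      exact hc
  · rw [pvScanA, dif_neg hn] at h
    omega
termination_by n - k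

theorem pvScanA_adv (g : List (List Int)) (j n : Nat) (couleur : Int) (k : Nat)
    (hk : k < n) (hc : pvCell g k j = couleur ∧ couleur ≠ -1) :
    k + 1 ≤ pvScanA g j n couleur k := by
  rw [pvScanA, dif_pos hk, if_pos hc]
  exact pvScanA_ge g j n couleur (k + 1)

theorem pvScanA_stall (g : List (List Int)) (j n : Nat) (couleur : Int) (k : Nat)
    (hc : ¬(pvCell g k j = couleur ∧ couleur ≠ -1)) :
    pvScanA g j n couleur k = k := by
  rw [pvScanA]
  simp [hc]

-- the Prop the B-side boolean test decides
def pvPB (g : List (List Int)) (n j i : Nat) : Prop :=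
  pvCell g i j ≠ -1 ∧ ∃ s : Nat, s ≤ i ∧ i ≤ s + 2 ∧ s + 2 < n ∧
    pvCell g s j = pvCell g i j ∧ pvCell g (s + 1) j = pvCell g i j ∧ pvCell g (s + 2) j = pvCell g i j

theorem pvWinB_iff (g : List (List Int)) (n j : Nat) (c : Int) (s : Int) :
    pvWinB g n j c s = true ↔
      ∃ t : Nat, (t : Int) = s ∧ t + 2 < n ∧ pvCell g t j = c ∧ pvCell g (t + 1) j = c ∧ pvCell g (t + 2) j = c := by
  unfold pvWinB
  simp only [Bool.and_eq_true, decide_eq_true_eq, beq_iff_eq]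
  constructor
  · rintro ⟨⟨⟨⟨h0, h2⟩, hs⟩, hs1⟩, hs2⟩
    refine ⟨s.toNat, by omega, by omega, hs, hs1, hs2⟩
  · rintro ⟨t, rfl, h2, hs, hs1, hs2⟩
    have ht : ((t : Int)).toNat = t := by omega
    rw [ht]
    exact ⟨⟨⟨⟨by omega, by omega⟩, hs⟩, hs1⟩, hs2⟩

theorem pvTestB_iff (g : List (List Int)) (n j i : Nat) :
    pvTestB g n j i = true ↔ pvPB g n j i := by
  unfold pvTestB pvPB
  simp only [Bool.and_eq_true, bne_iff_ne, ne_eq, List.any_eq_true, List.mem_cons,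
    List.not_mem_nil, or_false, pvWinB_iff]
  constructor
  · rintro ⟨hne, s, hs, t, hts, h2, ha, hb, hc⟩
    refine ⟨hne, t, ?_, ?_, h2, ha, hb, hc⟩ <;> omega
  · rintro ⟨hne, t, h1, h2, h3, ha, hb, hc⟩
    refine ⟨hne, (t : Int), ?_, t, rfl, h3, ha, hb, hc⟩
    omega

-- main per-column lemma: the outer while starting at a segment boundary emits exactly
-- the cells passing B's window test
theorem pvOuterA_eq (g : List (List Int)) (j n : Nat) (k : Nat) (acc : List (List Int))
    (hk : k ≤ n)
    (hinv : k = 0 ∨ n ≤ k ∨ pvCell g (k - 1) j ≠ pvCell g k j ∨ pvCell g (k - 1) j = -1) :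
    pvOuterA g j n k acc =
      acc ++ ((List.range' k (n - k)).filter (pvTestB g n j)).map (fun i : Nat => [(i : Int), (j : Int)]) := by
  by_cases hkn : k < n
  · rw [pvOuterA, dif_pos hkn]
    dsimp only
    by_cases hneg : pvCell g k j = -1
    · -- color -1: the inner while stalls, `k == debut`, nothing is emitted
      have hs : pvScanA g j n (pvCell g k j) k = k := pvScanA_stall _ _ _ _ _ (by simp [hneg])
      rw [hs, if_neg (by omega : ¬ 3 ≤ k - k), if_pos rfl]
      rw [pvOuterA_eq g j n (k + 1) acc (by omega)
        (by right; right; right; simpa using hneg)]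
      have hr : List.range' k (n - k) = k :: List.range' (k + 1) (n - (k + 1)) := by
        have h1 : n - k = (n - (k + 1)) + 1 := by omega
        rw [h1, List.range'_succ]
      have htf : pvTestB g n j k = false := by
        rw [Bool.eq_false_iff]
        intro h
        exact ((pvTestB_iff g n j k).mp h).1 hneg
      rw [hr, List.filter_cons, htf]
      simp
    · -- a genuine run [k, k') of color `col ≠ -1`
      set col := pvCell g k j with hcol
      set k' := pvScanA g j n col k with hk'def
      have hcond : pvCell g k j = col ∧ col ≠ -1 := ⟨hcol.symm, hneg⟩
      have hadv : k + 1 ≤ k' := pvScanA_adv g j n col k hkn hcond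
      have hle : k' ≤ n := pvScanA_le g j n col k (le_of_lt hkn)
      have hrun : ∀ t, k ≤ t → t < k' → pvCell g t j = col :=
        fun t h1 h2 => (pvScanA_run g j n col k t h1 h2).1
      have hstop : k' < n → pvCell g k' j ≠ col :=
        fun h he => (pvScanA_stop g j n col k h) ⟨he, hneg⟩
      rw [if_neg (by omega : ¬ k' = k)]
      have hinv' : k' = 0 ∨ n ≤ k' ∨ pvCell g (k' - 1) j ≠ pvCell g k' j ∨ pvCell g (k' - 1) j = -1 := by
        by_cases h : k' < n
        · right; right; left
          rw [hrun (k' - 1) (by omega) (by omega)]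
          exact fun he => hstop h he.symm
        · right; left; omega
      rw [pvOuterA_eq g j n k' _ hle hinv']
      have hsplit : List.range' k (n - k) = List.range' k (k' - k) ++ List.range' (k + (k' - k)) (n - k') := by
        rw [List.range'_append_1]
        congr 1
        omega
      have hkk : k + (k' - k) = k' := by omega
      rw [hsplit, hkk, List.filter_append, List.map_append]
      have hfilter : (List.range' k (k' - k)).filter (pvTestB g n j) =
          if 3 ≤ k' - k then List.range' k (k' - k) else [] := by
        by_cases h3 : 3 ≤ k' - k
        · rw [if_pos h3, List.filter_eq_self]
          intro i hi
          rw [List.mem_range'_1] at hi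
          have hik : k ≤ i := hi.1
          have hik' : i < k' := by omega
          have hci : pvCell g i j = col := hrun i hik hik'
          rw [pvTestB_iff]
          refine ⟨by rw [hci]; exact hneg, min i (k' - 3), by omega, by omega, by omega, ?_, ?_, ?_⟩
          · rw [hci]; exact hrun _ (by omega) (by omega)
          · rw [hci]; exact hrun _ (by omega) (by omega)
          · rw [hci]; exact hrun _ (by omega) (by omega)
        · rw [if_neg h3, List.filter_eq_nil_iff]
          intro i hi ht
          rw [List.mem_range'_1] at hi
          have hik : k ≤ i := hi.1
          have hik' : i < k' := by omega
          have hci : pvCell g i j = col := hrun i hik hik'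
          obtain ⟨hne', s, hs1, hs2, hs3, ha, hb, hc⟩ := (pvTestB_iff g n j i).mp ht
          -- the monochromatic window [s, s+2] must lie inside the maximal run [k, k')
          have hsk : k ≤ s := by
            by_contra hlt
            push Not at hlt
            have hk1 : pvCell g (k - 1) j = pvCell g i j := by
              rcases (by omega : k - 1 = s ∨ k - 1 = s + 1 ∨ k - 1 = s + 2) with h | h | h <;>
                rw [h] <;> assumption
            rcases hinv with h0 | hn | hne2 | hm1
            · omega
            · omega
            · exact hne2 (hk1.trans hci)
            · exact hne' (hk1.symm.trans hm1)
          have hsk2 : s + 2 < k' := by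
            by_contra hge
            push Not at hge
            have hkn' : k' < n := by omega
            have hk2 : pvCell g k' j = pvCell g i j := by
              rcases (by omega : k' = s + 1 ∨ k' = s + 2) with h | h <;> rw [h] <;> assumption
            exact hstop hkn' (hk2.trans hci)
          omega
      rw [hfilter]
      split_ifs with h3 <;> simp
  · rw [pvOuterA, dif_neg hkn]
    have h0 : n - k = 0 := by omega
    rw [h0]
    simp
termination_by n - k
decreasing_by
  all_goals first
    | omega
    | (have := pvScanA_adv g j n (pvCell g k j) k hkn ⟨rfl, hneg⟩; omega)

theorem pvColB_eq (g : List (List Int)) (n j : Nat) :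
    pvColB g n j = ((List.range' 0 n).filter (pvTestB g n j)).map (fun i : Nat => [(i : Int), (j : Int)]) := by
  unfold pvColB
  rw [PySem.List.foldl_append_if, List.range_eq_range']
  simp

-- ===== VERDICT (by name: the statement is the Claim_ definition above) =====
theorem detecter_alignement_verti_spec : Claim_equal_detecter_alignement_verti := by
  intro g _dom _pre
  unfold Spec_detecter_alignement_verti detecter_alignement_verti detecter_alignement_verti_alt
  have hfun : ∀ (acc : List (List Int)) (j : Nat),
      pvOuterA g j g.length 0 acc = acc ++ pvColB g g.length j := by
    intro acc j
    rw [pvColB_eq, pvOuterA_eq g j g.length 0 acc (Nat.zero_le _) (Or.inl rfl)]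
    simp
  simp only [hfun]
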